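-- pv_equiv track=rewrite | github.com/yujin45/CodingTestStudy | 프로그래머스/0/120835. 진료 순서 정하기/진료 순서 정하기.py | solution
-- ===== SOURCE A (Python) =====
-- def solution(emergency):
--     # 응급 순서로 딕셔너리 만들기
--     e_sorted = sorted(emergency, reverse=True)
--
--     dict = {}
--     for i, e in enumerate(e_sorted):
--         dict[e] = i+1
--
--     answer = []
--     for e in emergency:
--         answer.append(dict.get(e))
--
--     return answer
-- ===== SOURCE B (Python) =====
-- def solution(emergency):
--     # rank of e = number of elements >= e (one counting scan per element; no sort, no dict)
--     return [sum(1 for x in emergency if x >= e) for e in emergency]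
-- ===== Notes on version B (the rewrite author's own statement) =====
-- stated objective: simpler
-- what changed: Replaces sort-descending + enumerate-built rank dict + lookup loop with a direct comprehension counting, for each element, how many elements are >= it.
import Mathlib
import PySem

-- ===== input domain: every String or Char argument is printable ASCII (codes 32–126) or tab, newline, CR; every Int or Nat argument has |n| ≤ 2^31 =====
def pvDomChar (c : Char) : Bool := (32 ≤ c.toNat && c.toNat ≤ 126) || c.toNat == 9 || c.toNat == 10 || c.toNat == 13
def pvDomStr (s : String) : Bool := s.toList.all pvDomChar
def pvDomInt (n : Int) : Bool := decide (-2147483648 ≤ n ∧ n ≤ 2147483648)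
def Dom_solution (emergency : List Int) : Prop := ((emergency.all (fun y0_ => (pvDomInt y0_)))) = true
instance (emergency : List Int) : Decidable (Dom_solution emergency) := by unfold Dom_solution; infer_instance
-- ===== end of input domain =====

-- B replaces A's sort + rank-dict + lookup loop with a per-element counting scan (simpler, no sort/dict).

-- ===== PORT A =====
-- dict.get(e) is ported as getD e 0: every e of emergency is a key of the dict
-- (it is inserted while iterating over sorted(emergency)), so the default is never used.
def solution (emergency : List Int) : List Int :=
  let e_sorted := PySem.List.sorted emergency (fun x => x) true
  let dict := (PySem.List.enumerate e_sorted 0).foldl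
    (fun d p => d.insert p.2 (p.1 + 1)) PySem.Dict.empty
  let answer := emergency.foldl (fun ans e => ans ++ [dict.getD e 0]) []
  answer

-- ===== PORT B =====
def solution_alt (emergency : List Int) : List Int :=
  emergency.map (fun e =>
    emergency.foldl (fun acc x => if e ≤ x then acc + 1 else acc) (0 : Int))

-- ===== PRECONDITION & SPEC =====
def Spec_solution (emergency : List Int) (out : List Int) : Prop := out = solution_alt emergency
instance (emergency : List Int) (out : List Int) : Decidable (Spec_solution emergency out) := by unfold Spec_solution; infer_instance

-- ===== CLAIM (what is proved, stated in full; the proofs are below) =====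
def Claim_equal_solution : Prop := ∀ (emergency : List Int), Dom_solution emergency → Spec_solution emergency (solution emergency)

-- ===== LEMMAS AND PROOFS =====

-- the answer-accumulating loop is a map
theorem foldl_append_singleton_eq_map {α β : Type} (f : α → β) :
    ∀ (l : List α) (acc : List β),
      l.foldl (fun ans e => ans ++ [f e]) acc = acc ++ l.map f := by
  intro l
  induction l with
  | nil => simp
  | cons a t ih => intro acc; simp [List.foldl, ih]

-- a dict-building loop over pairs whose second components avoid e leaves getD e unchanged
theorem getD_foldl_insert_not_mem (e : Int) :
    ∀ (t : List Int) (k : Int) (d : PySem.Dict Int Int), e ∉ t →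
      (((PySem.List.enumerate t k).foldl
          (fun d p => d.insert p.2 (p.1 + 1)) d).getD e 0) = d.getD e 0 := by
  intro t
  induction t with
  | nil => intro k d _; simp [PySem.List.enumerate_nil]
  | cons a t ih =>
    intro k d he
    rw [PySem.List.enumerate_cons]
    simp only [List.foldl]
    rw [ih (k + 1) _ (fun h => he (List.mem_cons_of_mem _ h))]
    rw [PySem.Dict.getD_insert]
    rw [if_neg (fun h => he (by simp [h]))]

-- core invariant: on a descending list s, the rank dict maps e ∈ s to k + #{x ∈ s | e ≤ x}
theorem getD_rankdict (e : Int) :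
    ∀ (s : List Int) (k : Int) (d : PySem.Dict Int Int),
      s.Pairwise (fun a b => b ≤ a) → e ∈ s →
      (((PySem.List.enumerate s k).foldl
          (fun d p => d.insert p.2 (p.1 + 1)) d).getD e 0)
        = k + (s.countP (fun x => decide (e ≤ x)) : Int) := by
  intro s
  induction s with
  | nil => intro k d _ he; cases he
  | cons a t ih =>
    intro k d hp he
    rw [PySem.List.enumerate_cons]
    simp only [List.foldl]
    rcases List.pairwise_cons.mp hp with ⟨hall, hpt⟩
    by_cases het : e ∈ t
    · have hea : e ≤ a := hall e het
      rw [ih (k + 1) _ hpt het]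
      simp only [List.countP_cons, hea, decide_true]
      push_cast
      ring
    · have hea : e = a := by
        rcases List.mem_cons.mp he with h | h
        · exact h
        · exact absurd h het
      subst hea
      rw [getD_foldl_insert_not_mem e t (k + 1) _ het]
      rw [PySem.Dict.getD_insert, if_pos rfl]
      have hcnt : t.countP (fun x => decide (e ≤ x)) = 0 := by
        apply List.countP_eq_zero.mpr
        intro x hx
        have hxa : x ≤ e := hall x hx
        have hxe : x ≠ e := fun h => het (h ▸ hx)
        simp only [decide_eq_true_eq]
        omega
      simp only [List.countP_cons, hcnt, le_refl, decide_true]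
      push_cast
      ring

-- ===== VERDICT (by name: the statement is the Claim_ definition above) =====
theorem solution_spec : Claim_equal_solution := by
  intro emergency _
  unfold Spec_solution solution solution_alt
  dsimp only
  rw [foldl_append_singleton_eq_map]
  simp only [List.nil_append]
  apply List.map_congr_left
  intro e he
  rw [getD_rankdict e _ 0 _
      (by simpa using PySem.List.sorted_pairwise_rev emergency (fun x => x))
      ((PySem.List.mem_sorted _ _ _ _).mpr he)]
  rw [PySem.List.foldl_ite_add_one]
  rw [(PySem.List.sorted_perm emergency (fun x => x) true).countP_eq]
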